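-- pv_equiv track=rewrite | github.com/LeanVibe/bee-hive | app/api/v2/agents/utils.py | _has_general_ability
-- ===== SOURCE A (Python) =====
-- from typing import Dict, List, Optional, Any, Union, Tuple
--
-- def _has_general_ability(capabilities: List[str], requirement: str) -> bool:
--     """Check if agent has general ability for requirement."""
--     general_abilities = {
--         'programming': ['python', 'javascript', 'java', 'go', 'rust'],
--         'web_development': ['frontend', 'backend', 'fullstack'],
--         'cloud': ['aws', 'azure', 'gcp', 'cloud'],
--         'database': ['sql', 'nosql', 'database']
--     }
--
--     for ability, related_caps in general_abilities.items():
--         if requirement in ability and any(cap.lower() in related_caps for cap in capabilities):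
--             return True
--
--     return False
-- ===== SOURCE B (Python) =====
-- def _has_general_ability(capabilities, requirement):
--     """Check if agent has general ability for requirement."""
--     general_abilities = {
--         'programming': ['python', 'javascript', 'java', 'go', 'rust'],
--         'web_development': ['frontend', 'backend', 'fullstack'],
--         'cloud': ['aws', 'azure', 'gcp', 'cloud'],
--         'database': ['sql', 'nosql', 'database']
--     }
--     # Reverse index: each capability keyword names exactly one general ability.
--     ability_of = {cap: ability
--                   for ability, caps in general_abilities.items()
--                   for cap in caps}
--     for cap in capabilities:
--         ability = ability_of.get(cap.lower())
--         if ability is not None and requirement in ability: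
--             return True
--     return False
-- ===== Notes on version B (the rewrite author's own statement) =====
-- stated objective: alternative
-- what changed: B inverts A's iteration: instead of scanning abilities with a per-ability inner scan of capabilities, it builds a reverse index dict mapping each capability keyword to its (unique) general ability, then makes one pass over the capabilities looking each up and testing the substring condition on the found ability.
import Mathlib
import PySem

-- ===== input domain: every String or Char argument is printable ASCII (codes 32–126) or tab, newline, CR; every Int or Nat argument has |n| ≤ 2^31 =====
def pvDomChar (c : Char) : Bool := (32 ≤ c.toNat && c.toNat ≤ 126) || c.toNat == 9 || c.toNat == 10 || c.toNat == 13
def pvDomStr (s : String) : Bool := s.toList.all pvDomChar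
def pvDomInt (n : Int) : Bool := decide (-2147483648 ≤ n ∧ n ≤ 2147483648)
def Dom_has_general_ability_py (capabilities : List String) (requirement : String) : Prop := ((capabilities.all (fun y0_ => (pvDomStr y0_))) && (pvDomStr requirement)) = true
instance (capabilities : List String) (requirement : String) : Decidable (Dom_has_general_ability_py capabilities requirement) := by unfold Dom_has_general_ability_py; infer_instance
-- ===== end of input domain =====

-- B is simpler: it inverts A's loops — a reverse index from each capability keyword to its (unique) general ability, then one pass over the capabilities; return values agree everywhere.


-- ===== PORT A =====
def pvGeneralAbilities : List (String × List String) :=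
  [("programming", ["python", "javascript", "java", "go", "rust"]),
   ("web_development", ["frontend", "backend", "fullstack"]),
   ("cloud", ["aws", "azure", "gcp", "cloud"]),
   ("database", ["sql", "nosql", "database"])]

-- A: loop over the dict items, returning True on the first ability that contains the
-- requirement as a substring and has some capability whose lowercase is in its related list.
def has_general_ability_py (capabilities : List String) (requirement : String) : Bool :=
  pvGeneralAbilities.any (fun p =>
    PySem.Str.isIn requirement p.1 &&
      capabilities.any (fun cap => p.2.contains (PySem.Str.lower cap)))

-- ===== PORT B =====
-- B: reverse index {capability keyword -> its general ability} built once from the table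
-- (the dict comprehension of Source B)...
def pvAbilityOf : PySem.Dict String String :=
  PySem.Dict.ofList (pvGeneralAbilities.flatMap (fun p => p.2.map (fun cap => (cap, p.1))))

-- ...then a single pass over the capabilities: look each one up ('.get', none = not found)
-- and test the substring condition on its ability.
def has_general_ability_py_alt (capabilities : List String) (requirement : String) : Bool :=
  capabilities.any (fun cap =>
    match pvAbilityOf.get? (PySem.Str.lower cap) with
    | some ability => PySem.Str.isIn requirement ability
    | none => false)

-- ===== PRECONDITION & SPEC =====
def Spec_has_general_ability_py (capabilities : List String) (requirement : String) (out : Bool) : Prop := out = has_general_ability_py_alt capabilities requirement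
instance (capabilities : List String) (requirement : String) (out : Bool) : Decidable (Spec_has_general_ability_py capabilities requirement out) := by unfold Spec_has_general_ability_py; infer_instance

-- ===== CLAIM (what is proved, stated in full; the proofs are below) =====
def Claim_equal_has_general_ability_py : Prop := ∀ (capabilities : List String) (requirement : String), Dom_has_general_ability_py capabilities requirement → Spec_has_general_ability_py capabilities requirement (has_general_ability_py capabilities requirement)

-- ===== LEMMAS AND PROOFS =====

lemma pv_any_or {α : Type} (l : List α) (p q : α → Bool) :
    (l.any fun a => p a || q a) = (l.any p || l.any q) := by
  induction l with
  | nil => rfl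
  | cons a t ih => simp [List.any_cons, ih]; ac_rfl

-- swapping the two 'any' scans (A: abilities outer; B: capabilities outer)
lemma pv_any_comm {α β : Type} (l : List α) (m : List β) (P : α → β → Bool) :
    (l.any fun a => m.any fun b => P a b) = (m.any fun b => l.any fun a => P a b) := by
  induction l with
  | nil => simp
  | cons a t ih =>
    rw [List.any_cons, ih, ← pv_any_or]
    simp [List.any_cons]

-- per-capability key: B's reverse-index lookup decides exactly A's row test, for every key
lemma pv_inner (req k : String) :
    (match pvAbilityOf.get? k with
      | some ability => PySem.Str.isIn req ability
      | none => false)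
    = pvGeneralAbilities.any (fun p => PySem.Str.isIn req p.1 && p.2.contains k) := by
  have hd : pvAbilityOf = PySem.Dict.mk [("python","programming"),("javascript","programming"),("java","programming"),("go","programming"),("rust","programming"),("frontend","web_development"),("backend","web_development"),("fullstack","web_development"),("aws","cloud"),("azure","cloud"),("gcp","cloud"),("cloud","cloud"),("sql","database"),("nosql","database"),("database","database")] := by rfl
  rw [hd]
  by_cases h0 : k = "python"
  · subst h0; simp [pvGeneralAbilities, PySem.Dict.get?_mk_cons]
  by_cases h1 : k = "javascript"
  · subst h1; simp [pvGeneralAbilities, PySem.Dict.get?_mk_cons]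
  by_cases h2 : k = "java"
  · subst h2; simp [pvGeneralAbilities, PySem.Dict.get?_mk_cons]
  by_cases h3 : k = "go"
  · subst h3; simp [pvGeneralAbilities, PySem.Dict.get?_mk_cons]
  by_cases h4 : k = "rust"
  · subst h4; simp [pvGeneralAbilities, PySem.Dict.get?_mk_cons]
  by_cases h5 : k = "frontend"
  · subst h5; simp [pvGeneralAbilities, PySem.Dict.get?_mk_cons]
  by_cases h6 : k = "backend"
  · subst h6; simp [pvGeneralAbilities, PySem.Dict.get?_mk_cons]
  by_cases h7 : k = "fullstack"
  · subst h7; simp [pvGeneralAbilities, PySem.Dict.get?_mk_cons]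
  by_cases h8 : k = "aws"
  · subst h8; simp [pvGeneralAbilities, PySem.Dict.get?_mk_cons]
  by_cases h9 : k = "azure"
  · subst h9; simp [pvGeneralAbilities, PySem.Dict.get?_mk_cons]
  by_cases h10 : k = "gcp"
  · subst h10; simp [pvGeneralAbilities, PySem.Dict.get?_mk_cons]
  by_cases h11 : k = "cloud"
  · subst h11; simp [pvGeneralAbilities, PySem.Dict.get?_mk_cons]
  by_cases h12 : k = "sql"
  · subst h12; simp [pvGeneralAbilities, PySem.Dict.get?_mk_cons]
  by_cases h13 : k = "nosql"
  · subst h13; simp [pvGeneralAbilities, PySem.Dict.get?_mk_cons]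
  by_cases h14 : k = "database"
  · subst h14; simp [pvGeneralAbilities, PySem.Dict.get?_mk_cons]
  simp [pvGeneralAbilities, Ne.symm h0, Ne.symm h1, Ne.symm h2, Ne.symm h3, Ne.symm h4, Ne.symm h5, Ne.symm h6, Ne.symm h7, Ne.symm h8, Ne.symm h9, Ne.symm h10, Ne.symm h11, Ne.symm h12, Ne.symm h13, Ne.symm h14, h0, h1, h2, h3, h4, h5, h6, h7, h8, h9, h10, h11, h12, h13, h14, PySem.Dict.get?]

-- ===== VERDICT (by name: the statement is the Claim_ definition above) =====
theorem has_general_ability_py_spec : Claim_equal_has_general_ability_py := by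
  intro caps req _
  unfold Spec_has_general_ability_py has_general_ability_py has_general_ability_py_alt
  simp only [List.and_any_distrib_left]
  rw [pv_any_comm]
  refine congrArg (caps.any ·) (funext fun c => ?_)
  exact (pv_inner req (PySem.Str.lower c)).symm
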